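-- pv_equiv track=rewrite | github.com/chobojajg/codequiz | 프로그래머스/0/181916. 주사위 게임 3/주사위 게임 3.py | solution
-- ===== SOURCE A (Python) =====
-- def solution(a, b, c, d):
--     dice = [a, b, c, d]
--     answer = 0
--     check = []
--     cnt = []
--     for i in range(4):
--         if dice[i] in check:
--             cnt[check.index(dice[i])] += 1
--         else:
--             check.append(dice[i])
--             cnt.append(1)
--     if 4 in cnt:
--         return 1111 * a
--     elif 3 in cnt:
--         return (10 * check[cnt.index(3)] + check[cnt.index(1)]) ** 2
--     elif 2 in cnt:
--         if 1 in cnt: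
--             check.pop(cnt.index(2))
--             return check[0] * check[1]
--         else:
--             return (check[0] + check[1]) * abs(check[0] - check[1])
--     else:
--         return min(check)
--
--     return answer
-- ===== SOURCE B (Python) =====
-- def solution(a, b, c, d):
--     # Classify the hand by the number of equal unordered pairs among the four
--     # dice (6 = four of a kind, 3 = three of a kind, 2 = two pairs, 1 = one
--     # pair, 0 = all distinct) and use closed-form scores for each class.
--     e = (a == b) + (a == c) + (a == d) + (b == c) + (b == d) + (c == d)
--     if e == 6:
--         return 1111 * a
--     if e == 3:
--         t = a if (a == b) + (a == c) + (a == d) >= 2 else b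
--         return (10 * t + (a + b + c + d - 3 * t)) ** 2
--     if e == 2:
--         m, M = min(a, b, c, d), max(a, b, c, d)
--         return (m + M) * (M - m)
--     if e == 1:
--         if a == b:
--             return c * d
--         if a == c:
--             return b * d
--         if a == d:
--             return b * c
--         if b == c:
--             return a * d
--         if b == d:
--             return a * c
--         return a * b
--     return min(a, b, c, d)
-- ===== Notes on version B (the rewrite author's own statement) =====
-- stated objective: simpler
-- what changed: B replaces A's incremental frequency-table loop (parallel check/cnt lists with list.index scans) by a closed-form classification: it counts the equal unordered pairs among the six dice pairs (6/3/2/1/0 identifies the hand) and computes each score directly with arithmetic (sum-based single for the triple, min/max for the two-pair case).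
import Mathlib
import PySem

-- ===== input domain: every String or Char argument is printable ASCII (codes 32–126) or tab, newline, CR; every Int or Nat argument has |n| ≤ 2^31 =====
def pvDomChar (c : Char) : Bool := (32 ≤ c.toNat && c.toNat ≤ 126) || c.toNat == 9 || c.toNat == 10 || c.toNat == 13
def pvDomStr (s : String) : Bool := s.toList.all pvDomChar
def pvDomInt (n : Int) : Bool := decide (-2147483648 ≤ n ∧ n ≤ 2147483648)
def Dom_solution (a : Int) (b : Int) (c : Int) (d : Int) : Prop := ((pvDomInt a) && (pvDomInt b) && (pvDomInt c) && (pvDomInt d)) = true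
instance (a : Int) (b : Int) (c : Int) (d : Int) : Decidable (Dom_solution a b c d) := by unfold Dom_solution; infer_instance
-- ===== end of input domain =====

-- B replaces A's frequency-table loop by a closed-form classification via the count of equal dice pairs (objective: simpler).

-- ===== PORT A =====
-- the loop 'for i in range(4): … dice[i] …' reads exactly the elements of dice in order, ported as a foldl over dice
def solution (a : Int) (b : Int) (c : Int) (d : Int) : Int :=
  let dice : List Int := [a, b, c, d]
  let st :=
    dice.foldl (fun (st : List Int × List Int) x =>
      if x ∈ st.1 then
        match PySem.List.index? st.1 x with
        | some j => (st.1, st.2.set j (st.2.getD j 0 + 1))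
        | none => (st.1, st.2)
      else (st.1 ++ [x], st.2 ++ [1]))
      ([], [])
  let check := st.1
  let cnt := st.2
  if (4 : Int) ∈ cnt then 1111 * a
  else if (3 : Int) ∈ cnt then
    match PySem.List.index? cnt 3, PySem.List.index? cnt 1 with
    | some j3, some j1 => (10 * check.getD j3 0 + check.getD j1 0) ^ 2
    | _, _ => 0
  else if (2 : Int) ∈ cnt then
    if (1 : Int) ∈ cnt then
      match PySem.List.index? cnt 2 with
      | some j =>
        match PySem.List.pop? check (j : Int) with
        | some (_, rest) => rest.getD 0 0 * rest.getD 1 0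
        | none => 0
      | none => 0
    else (check.getD 0 0 + check.getD 1 0) * |check.getD 0 0 - check.getD 1 0|
  else
    match PySem.List.min? check (fun x => x) with
    | some m => m
    | none => 0

-- ===== PORT B =====
def solution_alt (a : Int) (b : Int) (c : Int) (d : Int) : Int :=
  let e : Int :=
    (if a = b then 1 else 0) + (if a = c then 1 else 0) + (if a = d then 1 else 0) +
    (if b = c then 1 else 0) + (if b = d then 1 else 0) + (if c = d then 1 else 0)
  if e = 6 then 1111 * a
  else if e = 3 then
    let t := if ((if a = b then (1 : Int) else 0) + (if a = c then 1 else 0) +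
                 (if a = d then 1 else 0)) ≥ 2 then a else b
    (10 * t + (a + b + c + d - 3 * t)) ^ 2
  else if e = 2 then
    let m := min (min (min a b) c) d
    let M := max (max (max a b) c) d
    (m + M) * (M - m)
  else if e = 1 then
    if a = b then c * d
    else if a = c then b * d
    else if a = d then b * c
    else if b = c then a * d
    else if b = d then a * c
    else a * b
  else min (min (min a b) c) d

-- ===== PRECONDITION & SPEC =====
def Spec_solution (a : Int) (b : Int) (c : Int) (d : Int) (out : Int) : Prop := out = solution_alt a b c d
instance (a : Int) (b : Int) (c : Int) (d : Int) (out : Int) : Decidable (Spec_solution a b c d out) := by unfold Spec_solution; infer_instance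

-- ===== CLAIM (what is proved, stated in full; the proofs are below) =====
def Claim_equal_solution : Prop := ∀ (a : Int) (b : Int) (c : Int) (d : Int), Dom_solution a b c d → Spec_solution a b c d (solution a b c d)

-- ===== LEMMAS AND PROOFS =====
theorem abs_sub_eq_max_sub_min (x y : Int) : |x - y| = max x y - min x y := by
  rcases le_total x y with h | h
  · rw [abs_of_nonpos (by omega : x - y ≤ 0), max_eq_right h, min_eq_left h]; ring
  · rw [abs_of_nonneg (by omega : (0:Int) ≤ x - y), max_eq_left h, min_eq_right h]
set_option maxHeartbeats 1000000
theorem sol_quad (a b c d : Int) (hab : a = b) (hac : a = c) (had : a = d) (hbc : b = c) (hbd : b = d) (hcd : c = d) :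
    solution a b c d = solution_alt a b c d := by
  subst_vars
  simp [solution, solution_alt, PySem.List.index?, List.idxOf?, List.findIdx?_cons, beq_iff_eq, PySem.List.pop?, PySem.List.pyIdx?, PySem.List.min?_id_cons, abs_sub_eq_max_sub_min, min_comm, min_assoc, min_left_comm, max_comm, max_assoc, max_left_comm]
  try ring
  try simp

theorem sol_tri_abc (a b c d : Int) (hab : a = b) (hac : a = c) (had : ¬a = d) (hbc : b = c) (hbd : ¬b = d) (hcd : ¬c = d) :
    solution a b c d = solution_alt a b c d := by
  subst_vars
  simp [solution, solution_alt, PySem.List.index?, List.idxOf?, List.findIdx?_cons, beq_iff_eq, PySem.List.pop?, PySem.List.pyIdx?, PySem.List.min?_id_cons, abs_sub_eq_max_sub_min, min_comm, min_assoc, min_left_comm, max_comm, max_assoc, max_left_comm, had, hbd, hcd, Ne.symm had, Ne.symm hbd, Ne.symm hcd]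
  try ring
  try simp

theorem sol_tri_abd (a b c d : Int) (hab : a = b) (hac : ¬a = c) (had : a = d) (hbc : ¬b = c) (hbd : b = d) (hcd : ¬c = d) :
    solution a b c d = solution_alt a b c d := by
  subst_vars
  simp [solution, solution_alt, PySem.List.index?, List.idxOf?, List.findIdx?_cons, beq_iff_eq, PySem.List.pop?, PySem.List.pyIdx?, PySem.List.min?_id_cons, abs_sub_eq_max_sub_min, min_comm, min_assoc, min_left_comm, max_comm, max_assoc, max_left_comm, hac, hbc, hcd, Ne.symm hac, Ne.symm hbc, Ne.symm hcd]
  try ring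
  try simp

theorem sol_tri_acd (a b c d : Int) (hab : ¬a = b) (hac : a = c) (had : a = d) (hbc : ¬b = c) (hbd : ¬b = d) (hcd : c = d) :
    solution a b c d = solution_alt a b c d := by
  subst_vars
  simp [solution, solution_alt, PySem.List.index?, List.idxOf?, List.findIdx?_cons, beq_iff_eq, PySem.List.pop?, PySem.List.pyIdx?, PySem.List.min?_id_cons, abs_sub_eq_max_sub_min, min_comm, min_assoc, min_left_comm, max_comm, max_assoc, max_left_comm, hab, hbc, hbd, Ne.symm hab, Ne.symm hbc, Ne.symm hbd]
  try ring
  try simp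

theorem sol_tri_bcd (a b c d : Int) (hab : ¬a = b) (hac : ¬a = c) (had : ¬a = d) (hbc : b = c) (hbd : b = d) (hcd : c = d) :
    solution a b c d = solution_alt a b c d := by
  subst_vars
  simp [solution, solution_alt, PySem.List.index?, List.idxOf?, List.findIdx?_cons, beq_iff_eq, PySem.List.pop?, PySem.List.pyIdx?, PySem.List.min?_id_cons, abs_sub_eq_max_sub_min, min_comm, min_assoc, min_left_comm, max_comm, max_assoc, max_left_comm, hab, hac, had, Ne.symm hab, Ne.symm hac, Ne.symm had]
  try ring
  try simp

theorem sol_tp_ab_cd (a b c d : Int) (hab : a = b) (hac : ¬a = c) (had : ¬a = d) (hbc : ¬b = c) (hbd : ¬b = d) (hcd : c = d) :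
    solution a b c d = solution_alt a b c d := by
  subst_vars
  simp [solution, solution_alt, PySem.List.index?, List.idxOf?, List.findIdx?_cons, beq_iff_eq, PySem.List.pop?, PySem.List.pyIdx?, PySem.List.min?_id_cons, abs_sub_eq_max_sub_min, min_comm, min_assoc, min_left_comm, max_comm, max_assoc, max_left_comm, hac, had, hbc, hbd, Ne.symm hac, Ne.symm had, Ne.symm hbc, Ne.symm hbd]
  try ring
  try simp

theorem sol_tp_ac_bd (a b c d : Int) (hab : ¬a = b) (hac : a = c) (had : ¬a = d) (hbc : ¬b = c) (hbd : b = d) (hcd : ¬c = d) :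
    solution a b c d = solution_alt a b c d := by
  subst_vars
  simp [solution, solution_alt, PySem.List.index?, List.idxOf?, List.findIdx?_cons, beq_iff_eq, PySem.List.pop?, PySem.List.pyIdx?, PySem.List.min?_id_cons, abs_sub_eq_max_sub_min, min_comm, min_assoc, min_left_comm, max_comm, max_assoc, max_left_comm, hab, had, hbc, hcd, Ne.symm hab, Ne.symm had, Ne.symm hbc, Ne.symm hcd]
  try ring
  try simp

theorem sol_tp_ad_bc (a b c d : Int) (hab : ¬a = b) (hac : ¬a = c) (had : a = d) (hbc : b = c) (hbd : ¬b = d) (hcd : ¬c = d) :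
    solution a b c d = solution_alt a b c d := by
  subst_vars
  simp [solution, solution_alt, PySem.List.index?, List.idxOf?, List.findIdx?_cons, beq_iff_eq, PySem.List.pop?, PySem.List.pyIdx?, PySem.List.min?_id_cons, abs_sub_eq_max_sub_min, min_comm, min_assoc, min_left_comm, max_comm, max_assoc, max_left_comm, hab, hac, hbd, hcd, Ne.symm hab, Ne.symm hac, Ne.symm hbd, Ne.symm hcd]
  try ring
  try simp

theorem sol_pair_ab (a b c d : Int) (hab : a = b) (hac : ¬a = c) (had : ¬a = d) (hbc : ¬b = c) (hbd : ¬b = d) (hcd : ¬c = d) :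
    solution a b c d = solution_alt a b c d := by
  subst_vars
  simp [solution, solution_alt, PySem.List.index?, List.idxOf?, List.findIdx?_cons, beq_iff_eq, PySem.List.pop?, PySem.List.pyIdx?, PySem.List.min?_id_cons, abs_sub_eq_max_sub_min, min_comm, min_assoc, min_left_comm, max_comm, max_assoc, max_left_comm, hac, had, hbc, hbd, hcd, Ne.symm hac, Ne.symm had, Ne.symm hbc, Ne.symm hbd, Ne.symm hcd]
  try ring
  try simp

theorem sol_pair_ac (a b c d : Int) (hab : ¬a = b) (hac : a = c) (had : ¬a = d) (hbc : ¬b = c) (hbd : ¬b = d) (hcd : ¬c = d) :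
    solution a b c d = solution_alt a b c d := by
  subst_vars
  simp [solution, solution_alt, PySem.List.index?, List.idxOf?, List.findIdx?_cons, beq_iff_eq, PySem.List.pop?, PySem.List.pyIdx?, PySem.List.min?_id_cons, abs_sub_eq_max_sub_min, min_comm, min_assoc, min_left_comm, max_comm, max_assoc, max_left_comm, hab, had, hbc, hbd, hcd, Ne.symm hab, Ne.symm had, Ne.symm hbc, Ne.symm hbd, Ne.symm hcd]
  try ring
  try simp

theorem sol_pair_ad (a b c d : Int) (hab : ¬a = b) (hac : ¬a = c) (had : a = d) (hbc : ¬b = c) (hbd : ¬b = d) (hcd : ¬c = d) :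
    solution a b c d = solution_alt a b c d := by
  subst_vars
  simp [solution, solution_alt, PySem.List.index?, List.idxOf?, List.findIdx?_cons, beq_iff_eq, PySem.List.pop?, PySem.List.pyIdx?, PySem.List.min?_id_cons, abs_sub_eq_max_sub_min, min_comm, min_assoc, min_left_comm, max_comm, max_assoc, max_left_comm, hab, hac, hbc, hbd, hcd, Ne.symm hab, Ne.symm hac, Ne.symm hbc, Ne.symm hbd, Ne.symm hcd]
  try ring
  try simp

theorem sol_pair_bc (a b c d : Int) (hab : ¬a = b) (hac : ¬a = c) (had : ¬a = d) (hbc : b = c) (hbd : ¬b = d) (hcd : ¬c = d) :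
    solution a b c d = solution_alt a b c d := by
  subst_vars
  simp [solution, solution_alt, PySem.List.index?, List.idxOf?, List.findIdx?_cons, beq_iff_eq, PySem.List.pop?, PySem.List.pyIdx?, PySem.List.min?_id_cons, abs_sub_eq_max_sub_min, min_comm, min_assoc, min_left_comm, max_comm, max_assoc, max_left_comm, hab, hac, had, hbd, hcd, Ne.symm hab, Ne.symm hac, Ne.symm had, Ne.symm hbd, Ne.symm hcd]
  try ring
  try simp

theorem sol_pair_bd (a b c d : Int) (hab : ¬a = b) (hac : ¬a = c) (had : ¬a = d) (hbc : ¬b = c) (hbd : b = d) (hcd : ¬c = d) :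
    solution a b c d = solution_alt a b c d := by
  subst_vars
  simp [solution, solution_alt, PySem.List.index?, List.idxOf?, List.findIdx?_cons, beq_iff_eq, PySem.List.pop?, PySem.List.pyIdx?, PySem.List.min?_id_cons, abs_sub_eq_max_sub_min, min_comm, min_assoc, min_left_comm, max_comm, max_assoc, max_left_comm, hab, hac, had, hbc, hcd, Ne.symm hab, Ne.symm hac, Ne.symm had, Ne.symm hbc, Ne.symm hcd]
  try ring
  try simp

theorem sol_pair_cd (a b c d : Int) (hab : ¬a = b) (hac : ¬a = c) (had : ¬a = d) (hbc : ¬b = c) (hbd : ¬b = d) (hcd : c = d) :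
    solution a b c d = solution_alt a b c d := by
  subst_vars
  simp [solution, solution_alt, PySem.List.index?, List.idxOf?, List.findIdx?_cons, beq_iff_eq, PySem.List.pop?, PySem.List.pyIdx?, PySem.List.min?_id_cons, abs_sub_eq_max_sub_min, min_comm, min_assoc, min_left_comm, max_comm, max_assoc, max_left_comm, hab, hac, had, hbc, hbd, Ne.symm hab, Ne.symm hac, Ne.symm had, Ne.symm hbc, Ne.symm hbd]
  try ring
  try simp

theorem sol_dist (a b c d : Int) (hab : ¬a = b) (hac : ¬a = c) (had : ¬a = d) (hbc : ¬b = c) (hbd : ¬b = d) (hcd : ¬c = d) :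
    solution a b c d = solution_alt a b c d := by
  
  simp [solution, solution_alt, PySem.List.index?, List.idxOf?, List.findIdx?_cons, beq_iff_eq, PySem.List.pop?, PySem.List.pyIdx?, PySem.List.min?_id_cons, abs_sub_eq_max_sub_min, min_comm, min_assoc, min_left_comm, max_comm, max_assoc, max_left_comm, hab, hac, had, hbc, hbd, hcd, Ne.symm hab, Ne.symm hac, Ne.symm had, Ne.symm hbc, Ne.symm hbd, Ne.symm hcd]
  try ring
  try simp

theorem sol_main (a b c d : Int) : solution a b c d = solution_alt a b c d := by
  by_cases hab : a = b <;> by_cases hac : a = c <;> by_cases had : a = d <;>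
    by_cases hbc : b = c <;> by_cases hbd : b = d <;> by_cases hcd : c = d <;>
    first
      | (exfalso; omega)
      | exact sol_quad a b c d hab hac had hbc hbd hcd
      | exact sol_tri_abc a b c d hab hac had hbc hbd hcd
      | exact sol_tri_abd a b c d hab hac had hbc hbd hcd
      | exact sol_tri_acd a b c d hab hac had hbc hbd hcd
      | exact sol_tri_bcd a b c d hab hac had hbc hbd hcd
      | exact sol_tp_ab_cd a b c d hab hac had hbc hbd hcd
      | exact sol_tp_ac_bd a b c d hab hac had hbc hbd hcd
      | exact sol_tp_ad_bc a b c d hab hac had hbc hbd hcd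
      | exact sol_pair_ab a b c d hab hac had hbc hbd hcd
      | exact sol_pair_ac a b c d hab hac had hbc hbd hcd
      | exact sol_pair_ad a b c d hab hac had hbc hbd hcd
      | exact sol_pair_bc a b c d hab hac had hbc hbd hcd
      | exact sol_pair_bd a b c d hab hac had hbc hbd hcd
      | exact sol_pair_cd a b c d hab hac had hbc hbd hcd
      | exact sol_dist a b c d hab hac had hbc hbd hcd

-- ===== VERDICT (by name: the statement is the Claim_ definition above) =====
theorem solution_spec : Claim_equal_solution := by
  intro a b c d _
  unfold Spec_solution
  exact sol_main a b c d
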